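-- pv_equiv track=rewrite | github.com/yumi-kitsune/scamscan | scan.py | build_usernames_to_block_from_v2
-- ===== SOURCE A (Python) =====
-- from typing import List, Tuple, Optional, Dict, Set, Any
--
-- def build_usernames_to_block_from_v2(
--     scammer_ids: Set[str],
--     scammer_map: Dict[str, Dict[str, Any]]
-- ) -> List[str]:
--     """
--     Build a de-duped list of @usernames to block from v2 data.
--     - Ignores username values that are None / "" / "None" / "DELETED"
--     - Normalizes to "@username"
--     - Dedupes case-insensitively
--     """
--     out: List[str] = []
--     seen: Set[str] = set()
--
--     for uid_str in scammer_ids: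
--         info = scammer_map.get(uid_str) or {}
--         u = (info.get("username") or "").strip()
--
--         if not u:
--             continue
--         if u.lower() in ("none", "deleted"):
--             continue
--
--         if not u.startswith("@"):
--             u = "@" + u
--
--         key = u.lower()
--         if key in seen:
--             continue
--         seen.add(key)
--         out.append(u)
--
--     out.sort(key=lambda x: x.lower())
--     return out
-- ===== SOURCE B (Python) =====
-- from typing import List, Tuple, Optional, Dict, Set, Any
--
--
-- def _norm(scammer_map, uid_str):
--     """Normalized '@username' for one id, or None if it must be skipped."""
--     info = scammer_map.get(uid_str) or {}
--     u = (info.get("username") or "").strip()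
--     if not u:
--         return None
--     if u.lower() in ("none", "deleted"):
--         return None
--     return u if u.startswith("@") else "@" + u
--
--
-- def build_usernames_to_block_from_v2(
--     scammer_ids: Set[str],
--     scammer_map: Dict[str, Dict[str, Any]]
-- ) -> List[str]:
--     # One normalize pass (no seen-set), then pick, for each distinct
--     # lowercase key in sorted order, the first candidate bearing it.
--     cands = [u for u in (_norm(scammer_map, s) for s in scammer_ids) if u is not None]
--     keys = sorted({u.lower() for u in cands})
--     return [next(u for u in cands if u.lower() == c) for c in keys]
-- ===== Notes on version B (the rewrite author's own statement) =====
-- stated objective: alternative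
-- what changed: Replaces A's first-seen hash-set dedup followed by a keyed sort with a seen-set-free pipeline: one filter+normalize pass, then the sorted set of distinct lowercase keys, then for each key in order the first candidate bearing it.
import Mathlib
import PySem

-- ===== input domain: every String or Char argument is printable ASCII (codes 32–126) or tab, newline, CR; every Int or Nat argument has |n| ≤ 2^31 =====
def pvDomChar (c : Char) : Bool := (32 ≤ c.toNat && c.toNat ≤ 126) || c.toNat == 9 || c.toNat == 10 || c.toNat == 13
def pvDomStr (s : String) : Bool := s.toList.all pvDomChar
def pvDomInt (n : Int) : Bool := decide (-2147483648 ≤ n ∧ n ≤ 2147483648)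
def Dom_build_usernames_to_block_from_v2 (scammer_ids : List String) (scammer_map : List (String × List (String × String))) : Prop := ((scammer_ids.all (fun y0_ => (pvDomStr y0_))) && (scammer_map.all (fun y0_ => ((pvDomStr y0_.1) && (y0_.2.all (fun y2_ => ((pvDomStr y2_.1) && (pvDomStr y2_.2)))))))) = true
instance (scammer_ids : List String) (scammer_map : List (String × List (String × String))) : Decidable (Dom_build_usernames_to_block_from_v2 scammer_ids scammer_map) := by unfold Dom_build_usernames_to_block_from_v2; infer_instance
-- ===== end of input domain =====

-- B replaces A's first-seen hash-set dedup followed by a keyed sort with a seen-set-free pipeline: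
-- one filter/normalize pass, then the sorted set of distinct lowercase keys, then for each key in
-- order the first candidate bearing it ("alternative" decomposition; same results, not claimed faster).
-- Python dicts are association lists here: lookup = first match.

-- ===== PORT A =====
def build_usernames_to_block_from_v2 (scammer_ids : List String) (scammer_map : List (String × List (String × String))) : List String :=
  let r := scammer_ids.foldl (fun (acc : List String × PySem.Set String) uid_str =>
      -- info = scammer_map.get(uid_str) or {}
      let info := ((scammer_map.find? (fun p => p.1 == uid_str)).map Prod.snd).getD []
      -- u = (info.get("username") or "").strip()
      let u := PySem.Str.strip (((info.find? (fun p => p.1 == "username")).map Prod.snd).getD "")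
      if u = "" then acc
      else if PySem.Str.lower u = "none" ∨ PySem.Str.lower u = "deleted" then acc
      else
        let u := if PySem.Str.startswith u "@" then u else "@" ++ u
        let key := PySem.Str.lower u
        if PySem.Set.contains acc.2 key then acc
        else (acc.1 ++ [u], PySem.Set.add acc.2 key))
    ([], PySem.Set.empty)
  PySem.List.sorted r.1 (fun x => PySem.Str.lower x) false

-- ===== PORT B =====
-- _norm of Source B
def pvNorm (scammer_map : List (String × List (String × String))) (uid_str : String) : Option String :=
  let info := ((scammer_map.find? (fun p => p.1 == uid_str)).map Prod.snd).getD []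
  let u := PySem.Str.strip (((info.find? (fun p => p.1 == "username")).map Prod.snd).getD "")
  if u = "" then none
  else if PySem.Str.lower u = "none" ∨ PySem.Str.lower u = "deleted" then none
  else some (if PySem.Str.startswith u "@" then u else "@" ++ u)

def build_usernames_to_block_from_v2_alt (scammer_ids : List String) (scammer_map : List (String × List (String × String))) : List String :=
  let cands := scammer_ids.filterMap (pvNorm scammer_map)
  let keys := PySem.List.sorted (PySem.Set.ofList (cands.map (fun u => PySem.Str.lower u))) (fun c => c) false
  -- next(u for u in cands if u.lower() == c): the .getD "" default is never used, every c comes from cands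
  keys.map (fun c => (cands.find? (fun u => PySem.Str.lower u == c)).getD "")

-- ===== PRECONDITION & SPEC =====
def Spec_build_usernames_to_block_from_v2 (scammer_ids : List String) (scammer_map : List (String × List (String × String))) (out : List String) : Prop := out = build_usernames_to_block_from_v2_alt scammer_ids scammer_map
instance (scammer_ids : List String) (scammer_map : List (String × List (String × String))) (out : List String) : Decidable (Spec_build_usernames_to_block_from_v2 scammer_ids scammer_map out) := by unfold Spec_build_usernames_to_block_from_v2; infer_instance

-- ===== CLAIM (what is proved, stated in full; the proofs are below) =====
def Claim_equal_build_usernames_to_block_from_v2 : Prop := ∀ (scammer_ids : List String) (scammer_map : List (String × List (String × String))), Dom_build_usernames_to_block_from_v2 scammer_ids scammer_map → Spec_build_usernames_to_block_from_v2 scammer_ids scammer_map (build_usernames_to_block_from_v2 scammer_ids scammer_map)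

-- ===== LEMMAS AND PROOFS =====

-- A's dedup loop, abstracted over the already-normalized candidate stream.
def pvGoDedup (seen : PySem.Set String) : List String → List String
  | [] => []
  | u :: us =>
    if PySem.Set.contains seen (PySem.Str.lower u) then pvGoDedup seen us
    else u :: pvGoDedup (PySem.Set.add seen (PySem.Str.lower u)) us

-- A's loop body, as a function of the normalized candidate
def pvStepA (m : List (String × List (String × String))) (acc : List String × PySem.Set String) (uid : String) : List String × PySem.Set String :=
  match pvNorm m uid with
  | none => acc
  | some u =>
    if PySem.Set.contains acc.2 (PySem.Str.lower u) then acc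
    else (acc.1 ++ [u], PySem.Set.add acc.2 (PySem.Str.lower u))

-- A's loop body is pvStepA
theorem pvLambda_eq (scammer_map : List (String × List (String × String))) :
    (fun (acc : List String × PySem.Set String) uid_str =>
      let info := ((scammer_map.find? (fun p => p.1 == uid_str)).map Prod.snd).getD []
      let u := PySem.Str.strip (((info.find? (fun p => p.1 == "username")).map Prod.snd).getD "")
      if u = "" then acc
      else if PySem.Str.lower u = "none" ∨ PySem.Str.lower u = "deleted" then acc
      else
        let u := if PySem.Str.startswith u "@" then u else "@" ++ u
        let key := PySem.Str.lower u
        if PySem.Set.contains acc.2 key then acc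
        else (acc.1 ++ [u], PySem.Set.add acc.2 key))
    = pvStepA scammer_map := by
  funext acc uid
  simp only [pvStepA, pvNorm]
  split_ifs <;> simp_all

-- A's fold over the ids equals pvGoDedup over the normalized candidate stream
theorem pvFoldA (m : List (String × List (String × String))) (ids : List String)
    (out : List String) (seen : PySem.Set String) :
    (ids.foldl (pvStepA m) (out, seen)).1
      = out ++ pvGoDedup seen (ids.filterMap (pvNorm m)) := by
  induction ids generalizing out seen with
  | nil => simp [pvGoDedup]
  | cons uid rest ih =>
    rw [List.foldl_cons, List.filterMap_cons]
    rcases h : pvNorm m uid with _ | u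
    · have hstep : pvStepA m (out, seen) uid = (out, seen) := by simp [pvStepA, h]
      rw [hstep]
      exact ih out seen
    · have hstep : pvStepA m (out, seen) uid
          = if PySem.Set.contains seen (PySem.Str.lower u) then (out, seen)
            else (out ++ [u], PySem.Set.add seen (PySem.Str.lower u)) := by
        simp [pvStepA, h]
      rw [hstep]
      show _ = out ++ pvGoDedup seen (u :: rest.filterMap (pvNorm m))
      rw [pvGoDedup]
      split_ifs with hc
      · exact ih out seen
      · rw [ih]
        simp

-- membership in pvGoDedup: exactly the first candidate of each unseen lowercase key
theorem pvMemGo (l : List String) (x : String) : ∀ (seen : PySem.Set String),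
    x ∈ pvGoDedup seen l ↔
      (PySem.Str.lower x ∉ seen ∧
       l.find? (fun y => PySem.Str.lower y == PySem.Str.lower x) = some x) := by
  induction l with
  | nil => intro seen; simp [pvGoDedup]
  | cons y ys ih =>
    intro seen
    rw [pvGoDedup, List.find?_cons]
    by_cases hk : PySem.Str.lower y = PySem.Str.lower x
    · have hbeq : (PySem.Str.lower y == PySem.Str.lower x) = true := by simp [hk]
      rw [hbeq]
      by_cases hc : PySem.Set.contains seen (PySem.Str.lower y) = true
      · rw [if_pos hc, ih]
        have hxseen : PySem.Str.lower x ∈ seen := by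
          rw [← hk]; exact (PySem.Set.contains_iff seen _).mp hc
        constructor
        · rintro ⟨h1, _⟩; exact absurd hxseen h1
        · rintro ⟨h1, _⟩; exact absurd hxseen h1
      · rw [if_neg hc]
        simp only [List.mem_cons, ih]
        constructor
        · rintro (rfl | ⟨hnot, _⟩)
          · refine ⟨?_, rfl⟩
            intro hm
            exact hc ((PySem.Set.contains_iff seen _).mpr (hk ▸ hm))
          · exfalso
            apply hnot
            rw [PySem.Set.mem_add]
            exact Or.inr hk.symm
        · rintro ⟨_, h2⟩
          left
          exact (Option.some.inj h2).symm
    · have hbeq : (PySem.Str.lower y == PySem.Str.lower x) = false := by simp [hk]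
      rw [hbeq]
      by_cases hc : PySem.Set.contains seen (PySem.Str.lower y) = true
      · rw [if_pos hc, ih]
      · rw [if_neg hc]
        simp only [List.mem_cons, ih]
        constructor
        · rintro (rfl | ⟨h1, h2⟩)
          · exact absurd rfl hk
          · refine ⟨?_, h2⟩
            intro hm
            exact h1 ((PySem.Set.mem_add seen _ _).mpr (Or.inl hm))
        · rintro ⟨h1, h2⟩
          right
          refine ⟨?_, h2⟩
          intro hm
          rcases (PySem.Set.mem_add seen _ _).mp hm with hm' | hm'
          · exact h1 hm'
          · exact hk hm'.symm

-- keys produced by pvGoDedup are pairwise distinct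
theorem pvNodupGo (l : List String) : ∀ (seen : PySem.Set String),
    (pvGoDedup seen l).Pairwise (fun a b => PySem.Str.lower a ≠ PySem.Str.lower b) := by
  induction l with
  | nil => intro seen; simp [pvGoDedup]
  | cons y ys ih =>
    intro seen
    rw [pvGoDedup]
    split_ifs with hc
    · exact ih seen
    · refine List.Pairwise.cons ?_ (ih _)
      intro b hb
      rcases (pvMemGo ys b _).mp hb with ⟨h1, _⟩
      intro h
      apply h1
      rw [PySem.Set.mem_add]
      exact Or.inr h.symm

-- ===== VERDICT (by name: the statement is the Claim_ definition above) =====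
theorem build_usernames_to_block_from_v2_spec : Claim_equal_build_usernames_to_block_from_v2 := by
  intro ids map _
  show build_usernames_to_block_from_v2 ids map = _
  show PySem.List.sorted (ids.foldl (fun (acc : List String × PySem.Set String) uid_str =>
      let info := ((map.find? (fun p => p.1 == uid_str)).map Prod.snd).getD []
      let u := PySem.Str.strip (((info.find? (fun p => p.1 == "username")).map Prod.snd).getD "")
      if u = "" then acc
      else if PySem.Str.lower u = "none" ∨ PySem.Str.lower u = "deleted" then acc
      else
        let u := if PySem.Str.startswith u "@" then u else "@" ++ u
        let key := PySem.Str.lower u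
        if PySem.Set.contains acc.2 key then acc
        else (acc.1 ++ [u], PySem.Set.add acc.2 key)) ([], PySem.Set.empty)).1
      (fun x => PySem.Str.lower x) false
    = (PySem.List.sorted (PySem.Set.ofList ((ids.filterMap (pvNorm map)).map (fun u => PySem.Str.lower u))) (fun c => c) false).map
        (fun c => ((ids.filterMap (pvNorm map)).find? (fun u => PySem.Str.lower u == c)).getD "")
  rw [pvLambda_eq map, pvFoldA map ids [] PySem.Set.empty, List.nil_append]
  set cands := ids.filterMap (pvNorm map) with hcands
  set keys := PySem.List.sorted (PySem.Set.ofList (cands.map (fun u => PySem.Str.lower u))) (fun c => c) false with hkeys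
  set D := pvGoDedup PySem.Set.empty cands with hD
  -- facts about each key of B's result
  have hkeyfact : ∀ c ∈ keys,
      cands.find? (fun u => PySem.Str.lower u == c)
        = some ((cands.find? (fun u => PySem.Str.lower u == c)).getD "")
      ∧ PySem.Str.lower ((cands.find? (fun u => PySem.Str.lower u == c)).getD "") = c := by
    intro c hc
    have hmem : c ∈ cands.map (fun u => PySem.Str.lower u) := by
      have := (PySem.List.mem_sorted _ _ _ _).mp hc
      simpa [PySem.Set.mem_ofList] using this
    rcases List.mem_map.mp hmem with ⟨u, hu, hcu⟩
    have hsome : (cands.find? (fun u => PySem.Str.lower u == c)).isSome := by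
      apply List.find?_isSome.mpr
      exact ⟨u, hu, by simp [hcu]⟩
    rcases Option.isSome_iff_exists.mp hsome with ⟨w, hw⟩
    refine ⟨by simp [hw], ?_⟩
    have := List.find?_some hw
    simpa [hw] using eq_of_beq this
  -- membership characterizations
  have hDmem : ∀ x, x ∈ D ↔
      cands.find? (fun u => PySem.Str.lower u == PySem.Str.lower x) = some x := by
    intro x
    rw [hD, pvMemGo]
    simp [PySem.Set.empty]
  have hRmem : ∀ x, x ∈ keys.map (fun c => (cands.find? (fun u => PySem.Str.lower u == c)).getD "") ↔
      cands.find? (fun u => PySem.Str.lower u == PySem.Str.lower x) = some x := by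
    intro x
    constructor
    · intro hx
      rcases List.mem_map.mp hx with ⟨c, hc, hcx⟩
      rcases hkeyfact c hc with ⟨hf, hl⟩
      rw [hcx] at hf hl
      rw [hl]
      exact hf
    · intro hf
      have hxc : x ∈ cands := List.mem_of_find?_eq_some hf
      have hck : PySem.Str.lower x ∈ keys := by
        rw [hkeys, PySem.List.mem_sorted, PySem.Set.mem_ofList]
        exact List.mem_map.mpr ⟨x, hxc, rfl⟩
      apply List.mem_map.mpr
      exact ⟨PySem.Str.lower x, hck, by rw [hf]; rfl⟩
  -- B's result has strictly increasing keys
  have hRpair : (keys.map (fun c => (cands.find? (fun u => PySem.Str.lower u == c)).getD "")).Pairwise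
      (fun a b => PySem.Str.lower a < PySem.Str.lower b) := by
    rw [List.pairwise_map]
    have hkp : keys.Pairwise (· < ·) := by
      rw [hkeys]; exact PySem.List.sorted_ofList_pairwise_lt _
    refine hkp.imp_of_mem ?_
    intro a b ha hb hab
    rw [(hkeyfact a ha).2, (hkeyfact b hb).2]
    exact hab
  -- both are Nodup
  have hRnodup : (keys.map (fun c => (cands.find? (fun u => PySem.Str.lower u == c)).getD "")).Nodup :=
    hRpair.imp (fun h e => by rw [e] at h; exact lt_irrefl _ h)
  have hDnodup : D.Nodup :=
    (pvNodupGo cands PySem.Set.empty).imp (fun h e => by rw [e] at h; exact h rfl)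
  -- same elements, hence a permutation
  have hperm : (keys.map (fun c => (cands.find? (fun u => PySem.Str.lower u == c)).getD "")).Perm D := by
    apply List.perm_of_nodup_nodup_toFinset_eq hRnodup hDnodup
    apply Finset.ext
    intro x
    simp only [List.mem_toFinset, hRmem, hDmem]
  exact PySem.List.sorted_eq_of_perm_of_pairwise_lt _ _ _ hperm hRpair
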